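-- pv_equiv track=rewrite | github.com/Michael-huo/ExpHub | scripts/_segment/research/risk.py | _window_anchor_indices
-- ===== SOURCE A (Python) =====
-- from bisect import bisect_left, bisect_right
--
-- def _window_anchor_indices(anchor_indices, start_idx, end_idx):
--     anchor_indices = sorted(int(idx) for idx in anchor_indices or [])
--     if not anchor_indices:
--         return []
--     start_idx = int(start_idx)
--     end_idx = int(end_idx)
--     pos_left = bisect_left(anchor_indices, start_idx)
--     pos_right = bisect_right(anchor_indices, end_idx)
--     indices = []
--     if pos_left > 0:
--         indices.append(int(anchor_indices[pos_left - 1]))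
--     indices.extend(int(idx) for idx in anchor_indices[pos_left:pos_right])
--     if pos_right < len(anchor_indices):
--         next_idx = int(anchor_indices[pos_right])
--         if not indices or int(indices[-1]) != next_idx:
--             indices.append(int(next_idx))
--     return indices
-- ===== SOURCE B (Python) =====
-- def _window_anchor_indices(anchor_indices, start_idx, end_idx):
--     arr = sorted(int(idx) for idx in anchor_indices or [])
--     if not arr:
--         return []
--     start_idx = int(start_idx)
--     end_idx = int(end_idx)
--     below = None
--     for x in arr:
--         if x >= start_idx:
--             break
--         below = x
--     middle = [x for x in arr if start_idx <= x <= end_idx]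
--     above = None
--     for x in arr:
--         if x > end_idx:
--             above = x
--             break
--     result = [below] if below is not None else []
--     result.extend(middle)
--     if above is not None and (not result or result[-1] != above):
--         result.append(above)
--     return result
-- ===== Notes on version B (the rewrite author's own statement) =====
-- stated objective: alternative
-- what changed: Replaces bisect_left/bisect_right and slice/index arithmetic with three direct linear passes over the sorted list: a scan for the last element below the window, a filter for the in-window elements, and a scan for the first element above.
import Mathlib
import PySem

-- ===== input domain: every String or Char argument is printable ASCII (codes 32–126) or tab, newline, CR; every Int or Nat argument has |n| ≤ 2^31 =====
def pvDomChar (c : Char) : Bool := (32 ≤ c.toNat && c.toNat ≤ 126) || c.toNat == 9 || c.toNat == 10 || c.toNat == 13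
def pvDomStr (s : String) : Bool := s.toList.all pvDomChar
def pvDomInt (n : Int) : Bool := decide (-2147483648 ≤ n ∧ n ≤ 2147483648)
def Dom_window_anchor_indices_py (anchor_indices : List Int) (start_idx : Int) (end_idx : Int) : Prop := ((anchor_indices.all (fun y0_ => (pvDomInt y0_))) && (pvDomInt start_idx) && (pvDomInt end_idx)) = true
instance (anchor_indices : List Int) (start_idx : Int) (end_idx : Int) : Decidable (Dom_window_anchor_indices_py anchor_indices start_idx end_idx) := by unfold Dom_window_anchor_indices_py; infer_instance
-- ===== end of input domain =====

-- B replaces A's two binary searches and index arithmetic by direct linear scans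
-- (last element below the window, a filter for the window, first element above);
-- objective: alternative decomposition, same results.

-- ===== PORT A =====
-- Python: sorted(int(idx) for idx in anchor_indices or []); int() is the identity on Int.
def window_anchor_indices_py (anchor_indices : List Int) (start_idx : Int) (end_idx : Int) : List Int :=
  let arr := PySem.List.sorted anchor_indices (fun x => x)
  if arr = [] then []
  else
    let posLeft := PySem.List.bisectLeft arr start_idx
    let posRight := PySem.List.bisectRight arr end_idx
    -- anchor_indices[pos_left - 1]: getD with default 0 is exact here, the index is provably in range (pos_left > 0).
    let indices := (if 0 < posLeft then [arr.getD (posLeft - 1) 0] else [])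
        ++ PySem.List.slice arr (some (posLeft : Int)) (some (posRight : Int))
    if posRight < arr.length then
      -- anchor_indices[pos_right]: in range since pos_right < len.
      let next := arr.getD posRight 0
      if indices = [] ∨ indices.getLast? ≠ some next then indices ++ [next] else indices
    else indices

-- ===== PORT B =====
-- 'for x in arr: if x >= start_idx: break; below = x'
def pvLastBelow (start_idx : Int) : List Int → Option Int → Option Int
  | [], acc => acc
  | x :: xs, acc => if start_idx ≤ x then acc else pvLastBelow start_idx xs (some x)

-- 'for x in arr: if x > end_idx: above = x; break'
def pvFirstAbove (end_idx : Int) : List Int → Option Int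
  | [] => none
  | x :: xs => if end_idx < x then some x else pvFirstAbove end_idx xs

def window_anchor_indices_py_alt (anchor_indices : List Int) (start_idx : Int) (end_idx : Int) : List Int :=
  let arr := PySem.List.sorted anchor_indices (fun x => x)
  if arr = [] then []
  else
    let below := pvLastBelow start_idx arr none
    let middle := arr.filter (fun x => decide (start_idx ≤ x) && decide (x ≤ end_idx))
    let above := pvFirstAbove end_idx arr
    let result := (match below with | some b => [b] | none => []) ++ middle
    match above with
    | none => result
    | some a => if result = [] ∨ result.getLast? ≠ some a then result ++ [a] else result

-- ===== PRECONDITION & SPEC =====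
def Spec_window_anchor_indices_py (anchor_indices : List Int) (start_idx : Int) (end_idx : Int) (out : List Int) : Prop := out = window_anchor_indices_py_alt anchor_indices start_idx end_idx
instance (anchor_indices : List Int) (start_idx : Int) (end_idx : Int) (out : List Int) : Decidable (Spec_window_anchor_indices_py anchor_indices start_idx end_idx out) := by unfold Spec_window_anchor_indices_py; infer_instance

-- ===== CLAIM (what is proved, stated in full; the proofs are below) =====
def Claim_equal_window_anchor_indices_py : Prop := ∀ (anchor_indices : List Int) (start_idx : Int) (end_idx : Int), Dom_window_anchor_indices_py anchor_indices start_idx end_idx → Spec_window_anchor_indices_py anchor_indices start_idx end_idx (window_anchor_indices_py anchor_indices start_idx end_idx)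

-- ===== LEMMAS AND PROOFS =====

-- B's first scan returns the element just before split position a (a = number of leading elements < start).
theorem pvLastBelow_char (s : Int) : ∀ (l : List Int) (a : Nat) (acc : Option Int),
    a ≤ l.length →
    (∀ j (hj : j < l.length), j < a → l[j] < s) →
    (∀ j (hj : j < l.length), a ≤ j → s ≤ l[j]) →
    pvLastBelow s l acc = if a = 0 then acc else l[a - 1]? := by
  intro l
  induction l with
  | nil =>
    intro a acc ha _ _
    have ha0 : a = 0 := by simpa using ha
    simp [pvLastBelow, ha0]
  | cons x xs ih =>
    intro a acc ha hlt hge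
    by_cases hx : s ≤ x
    · have ha0 : a = 0 := by
        by_contra h
        have := hlt 0 (by simp) (by omega)
        simp at this; omega
      simp [pvLastBelow, if_pos hx, ha0]
    · have ha0 : a ≠ 0 := by
        intro h
        exact hx (by simpa using hge 0 (by simp) (by omega))
      obtain ⟨a', rfl⟩ : ∃ a', a = a' + 1 := ⟨a - 1, by omega⟩
      have := ih a' (some x)
        (by simpa using ha)
        (fun j hj h => by simpa using hlt (j+1) (by simpa using Nat.succ_lt_succ hj) (by omega))
        (fun j hj h => by simpa using hge (j+1) (by simpa using Nat.succ_lt_succ hj) (by omega))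
      simp only [pvLastBelow, if_neg hx, this]
      rcases Nat.eq_zero_or_pos a' with h0 | hpos
      · simp [h0]
      · have h1 : a' + 1 ≠ 0 := by omega
        have h2 : a' ≠ 0 := by omega
        rw [if_neg h2, if_neg h1, Nat.add_sub_cancel, List.getElem?_cons, if_neg h2]

-- B's last scan returns the element at split position b (b = number of leading elements ≤ end).
theorem pvFirstAbove_char (e : Int) : ∀ (l : List Int) (b : Nat),
    b ≤ l.length →
    (∀ j (hj : j < l.length), j < b → l[j] ≤ e) →
    (∀ j (hj : j < l.length), b ≤ j → e < l[j]) →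
    pvFirstAbove e l = l[b]? := by
  intro l
  induction l with
  | nil =>
    intro b hb _ _
    have hb0 : b = 0 := by simpa using hb
    simp [pvFirstAbove, hb0]
  | cons x xs ih =>
    intro b hb hle hgt
    by_cases hx : e < x
    · have hb0 : b = 0 := by
        by_contra h
        have := hle 0 (by simp) (by omega)
        simp at this; omega
      simp [pvFirstAbove, if_pos hx, hb0]
    · have hb0 : b ≠ 0 := by
        intro h
        exact hx (by simpa using hgt 0 (by simp) (by omega))
      obtain ⟨b', rfl⟩ : ∃ b', b = b' + 1 := ⟨b - 1, by omega⟩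
      have := ih b'
        (by simpa using hb)
        (fun j hj h => by simpa using hle (j+1) (by simpa using Nat.succ_lt_succ hj) (by omega))
        (fun j hj h => by simpa using hgt (j+1) (by simpa using Nat.succ_lt_succ hj) (by omega))
      simp [pvFirstAbove, if_neg hx, this]

-- B's filter equals A's slice between the two split positions.
theorem middle_char (s e : Int) : ∀ (l : List Int) (a b : Nat),
    a ≤ l.length → b ≤ l.length →
    (∀ j (hj : j < l.length), j < a → l[j] < s) →
    (∀ j (hj : j < l.length), a ≤ j → s ≤ l[j]) →
    (∀ j (hj : j < l.length), j < b → l[j] ≤ e) →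
    (∀ j (hj : j < l.length), b ≤ j → e < l[j]) →
    l.filter (fun x => decide (s ≤ x) && decide (x ≤ e)) = (l.drop a).take (b - a) := by
  intro l
  induction l with
  | nil => intro a b ha hb _ _ _ _; simp
  | cons x xs ih =>
    intro a b ha hb h1 h2 h3 h4
    rcases Nat.eq_zero_or_pos a with ha0 | hapos
    · subst ha0
      have hx_ge : s ≤ x := by simpa using h2 0 (by simp) (by omega)
      rcases Nat.eq_zero_or_pos b with hb0 | hbpos
      · subst hb0
        have hx_gt : e < x := by simpa using h4 0 (by simp) (by omega)
        have hxs : xs.filter (fun x => decide (s ≤ x) && decide (x ≤ e)) = [] := by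
          rw [ih 0 0 (by omega) (by omega)
            (fun j hj h => by omega)
            (fun j hj _ => by simpa using h2 (j+1) (by simpa using Nat.succ_lt_succ hj) (by omega))
            (fun j hj h => by omega)
            (fun j hj _ => by simpa using h4 (j+1) (by simpa using Nat.succ_lt_succ hj) (by omega))]
          simp
        simp [List.filter_cons, hxs, not_le.mpr hx_gt]
      · obtain ⟨b', rfl⟩ : ∃ b', b = b' + 1 := ⟨b - 1, by omega⟩
        have hx_le : x ≤ e := by simpa using h3 0 (by simp) (by omega)
        have hxs := ih 0 b' (by omega) (by simpa using hb)
          (fun j hj h => by omega)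
          (fun j hj _ => by simpa using h2 (j+1) (by simpa using Nat.succ_lt_succ hj) (by omega))
          (fun j hj h => by simpa using h3 (j+1) (by simpa using Nat.succ_lt_succ hj) (by omega))
          (fun j hj h => by simpa using h4 (j+1) (by simpa using Nat.succ_lt_succ hj) (by omega))
        simp [List.filter_cons, hx_ge, hx_le, hxs]
    · obtain ⟨a', rfl⟩ : ∃ a', a = a' + 1 := ⟨a - 1, by omega⟩
      have hx_lt : x < s := by simpa using h1 0 (by simp) (by omega)
      rcases Nat.eq_zero_or_pos b with hb0 | hbpos
      · subst hb0
        have hxs : xs.filter (fun x => decide (s ≤ x) && decide (x ≤ e)) = [] := by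
          rw [ih a' 0 (by simpa using ha) (by omega)
            (fun j hj h => by simpa using h1 (j+1) (by simpa using Nat.succ_lt_succ hj) (by omega))
            (fun j hj h => by simpa using h2 (j+1) (by simpa using Nat.succ_lt_succ hj) (by omega))
            (fun j hj h => by omega)
            (fun j hj _ => by simpa using h4 (j+1) (by simpa using Nat.succ_lt_succ hj) (by omega))]
          simp
        simp [List.filter_cons, not_le.mpr hx_lt, hxs]
      · obtain ⟨b', rfl⟩ : ∃ b', b = b' + 1 := ⟨b - 1, by omega⟩
        have hxs := ih a' b' (by simpa using ha) (by simpa using hb)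
          (fun j hj h => by simpa using h1 (j+1) (by simpa using Nat.succ_lt_succ hj) (by omega))
          (fun j hj h => by simpa using h2 (j+1) (by simpa using Nat.succ_lt_succ hj) (by omega))
          (fun j hj h => by simpa using h3 (j+1) (by simpa using Nat.succ_lt_succ hj) (by omega))
          (fun j hj h => by simpa using h4 (j+1) (by simpa using Nat.succ_lt_succ hj) (by omega))
        simpa [not_le.mpr hx_lt, Nat.succ_sub_succ] using hxs

-- ===== VERDICT (by name: the statement is the Claim_ definition above) =====
theorem window_anchor_indices_py_spec : Claim_equal_window_anchor_indices_py := by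
  intro anchor_indices s e _
  unfold Spec_window_anchor_indices_py window_anchor_indices_py window_anchor_indices_py_alt
  set arr := PySem.List.sorted anchor_indices (fun x => x) with harr
  by_cases hnil : arr = []
  · simp [hnil]
  · simp only [if_neg hnil]
    have hs : arr.Pairwise (fun x y => x ≤ y) := PySem.List.sorted_pairwise anchor_indices (fun x => x)
    obtain ⟨hpl_le, hpl_lt, hpl_ge⟩ := PySem.List.bisectLeft_spec arr s hs
    obtain ⟨hpr_le, hpr_lt, hpr_ge⟩ := PySem.List.bisectRight_spec arr e hs
    set pl := PySem.List.bisectLeft arr s with hpl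
    set pr := PySem.List.bisectRight arr e with hpr
    have hbelow := pvLastBelow_char s arr pl none hpl_le hpl_lt hpl_ge
    have habove := pvFirstAbove_char e arr pr hpr_le hpr_lt hpr_ge
    have hmid := middle_char s e arr pl pr hpl_le hpr_le hpl_lt hpl_ge hpr_lt hpr_ge
    rw [PySem.List.slice_natCast, ← hmid, hbelow, habove]
    have hlenpos : 0 < arr.length := List.length_pos_iff.mpr hnil
    have hbeq : (if 0 < pl then [arr.getD (pl - 1) 0] else [])
        = (match (if pl = 0 then (none : Option Int) else arr[pl - 1]?) with
           | some b => [b] | none => []) := by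
      rcases Nat.eq_zero_or_pos pl with h0 | hpos
      · simp [h0]
      · have hidx : pl - 1 < arr.length := by omega
        rw [if_pos hpos, if_neg (by omega), List.getElem?_eq_getElem hidx]
        simp [List.getD_eq_getElem?_getD, List.getElem?_eq_getElem hidx]
    rw [hbeq]
    by_cases hprlt : pr < arr.length
    · rw [if_pos hprlt, List.getElem?_eq_getElem hprlt]
      simp [List.getD_eq_getElem?_getD, List.getElem?_eq_getElem hprlt]
    · have hnone : arr[pr]? = none := List.getElem?_eq_none_iff.mpr (by omega)
      rw [if_neg hprlt, hnone]
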